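-- pv_equiv track=rewrite | github.com/Ragnvald88/bruce_springsteen_monitor | src/core/stealth_engine.py | _order_headers
-- ===== SOURCE A (Python) =====
-- from typing import Dict, List, Optional, Any, Tuple, Set, Union, Callable
--
-- def _order_headers(headers: Dict[str, str], browser: str) -> Dict[str, str]:
--     """Order headers according to browser behavior"""
--
--     browser_orders = {
--         'Chrome': [
--             'host', 'connection', 'cache-control', 'sec-ch-ua',
--             'sec-ch-ua-mobile', 'sec-ch-ua-platform', 'upgrade-insecure-requests',
--             'user-agent', 'accept', 'sec-fetch-site', 'sec-fetch-mode',
--             'sec-fetch-user', 'sec-fetch-dest', 'referer', 'accept-encoding',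
--             'accept-language', 'cookie'
--         ],
--         'Firefox': [
--             'host', 'user-agent', 'accept', 'accept-language',
--             'accept-encoding', 'referer', 'connection', 'cookie',
--             'upgrade-insecure-requests', 'sec-fetch-dest',
--             'sec-fetch-mode', 'sec-fetch-site'
--         ],
--         'Safari': [
--             'host', 'cookie', 'connection', 'upgrade-insecure-requests',
--             'accept', 'user-agent', 'referer', 'accept-language',
--             'accept-encoding'
--         ]
--     }
--
--     order = browser_orders.get(browser, browser_orders['Chrome'])
--     ordered = {}
--
--     # Add headers in order
--     for key in order:
--         if key in headers:
--             ordered[key] = headers[key]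
--
--     # Add remaining headers
--     for key, value in headers.items():
--         if key not in ordered:
--             ordered[key] = value
--
--     return ordered
-- ===== SOURCE B (Python) =====
-- def _order_headers(headers, browser):
--     """Order headers according to browser behavior (single pass into rank-indexed slots)."""
--
--     browser_orders = {
--         'Chrome': [
--             'host', 'connection', 'cache-control', 'sec-ch-ua',
--             'sec-ch-ua-mobile', 'sec-ch-ua-platform', 'upgrade-insecure-requests',
--             'user-agent', 'accept', 'sec-fetch-site', 'sec-fetch-mode',
--             'sec-fetch-user', 'sec-fetch-dest', 'referer', 'accept-encoding',
--             'accept-language', 'cookie'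
--         ],
--         'Firefox': [
--             'host', 'user-agent', 'accept', 'accept-language',
--             'accept-encoding', 'referer', 'connection', 'cookie',
--             'upgrade-insecure-requests', 'sec-fetch-dest',
--             'sec-fetch-mode', 'sec-fetch-site'
--         ],
--         'Safari': [
--             'host', 'cookie', 'connection', 'upgrade-insecure-requests',
--             'accept', 'user-agent', 'referer', 'accept-language',
--             'accept-encoding'
--         ]
--     }
--
--     order = browser_orders.get(browser, browser_orders['Chrome'])
--     rank = {key: i for i, key in enumerate(order)}
--
--     slots = [None] * len(order)
--     tail = []
--     for key, value in headers.items():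
--         r = rank.get(key)
--         if r is None:
--             tail.append((key, value))
--         else:
--             slots[r] = (key, value)
--
--     return dict([kv for kv in slots if kv is not None] + tail)
-- ===== Notes on version B (the rewrite author's own statement) =====
-- stated objective: alternative
-- what changed: Instead of A's two rebuild passes (scan the browser order probing the headers dict, then rescan headers probing the partially built result), B precomputes a key->position rank table once and makes a single pass over the headers, dropping each ranked header into its fixed slot and appending unranked ones to a tail, then concatenates filled slots and tail.
import Mathlib
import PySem

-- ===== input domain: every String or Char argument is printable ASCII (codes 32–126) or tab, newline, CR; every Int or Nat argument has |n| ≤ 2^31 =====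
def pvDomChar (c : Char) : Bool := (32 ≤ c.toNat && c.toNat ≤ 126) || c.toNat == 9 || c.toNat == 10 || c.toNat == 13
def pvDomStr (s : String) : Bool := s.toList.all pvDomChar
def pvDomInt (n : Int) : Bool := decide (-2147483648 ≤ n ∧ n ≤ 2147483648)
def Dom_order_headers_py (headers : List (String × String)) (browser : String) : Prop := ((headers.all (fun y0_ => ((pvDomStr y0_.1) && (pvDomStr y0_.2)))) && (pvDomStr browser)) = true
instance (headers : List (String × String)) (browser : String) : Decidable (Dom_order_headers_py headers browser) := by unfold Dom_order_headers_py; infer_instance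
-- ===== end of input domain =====

-- B replaces A's two dict-rebuilding passes by one precomputed rank table plus a single
-- pass over the headers into rank-indexed slots and a tail (alternative decomposition, same cost).


-- ===== PORT A =====
-- the literal `browser_orders` table both Python sources contain verbatim
def pvChromeOrder : List String :=
  ["host", "connection", "cache-control", "sec-ch-ua",
   "sec-ch-ua-mobile", "sec-ch-ua-platform", "upgrade-insecure-requests",
   "user-agent", "accept", "sec-fetch-site", "sec-fetch-mode",
   "sec-fetch-user", "sec-fetch-dest", "referer", "accept-encoding",
   "accept-language", "cookie"]
def pvFirefoxOrder : List String :=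
  ["host", "user-agent", "accept", "accept-language",
   "accept-encoding", "referer", "connection", "cookie",
   "upgrade-insecure-requests", "sec-fetch-dest",
   "sec-fetch-mode", "sec-fetch-site"]
def pvSafariOrder : List String :=
  ["host", "cookie", "connection", "upgrade-insecure-requests",
   "accept", "user-agent", "referer", "accept-language",
   "accept-encoding"]
def pvBrowserOrders : PySem.Dict String (List String) :=
  PySem.Dict.mk [("Chrome", pvChromeOrder), ("Firefox", pvFirefoxOrder), ("Safari", pvSafariOrder)]

def order_headers_py (headers : List (String × String)) (browser : String) : List (String × String) :=
  let browser_orders := pvBrowserOrders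
  -- browser_orders.get(browser, browser_orders['Chrome']); browser_orders['Chrome'] is the literal pvChromeOrder
  let order := browser_orders.getD browser pvChromeOrder
  let hd := PySem.Dict.mk headers
  -- for key in order: if key in headers: ordered[key] = headers[key]
  let ordered : PySem.Dict String String :=
    order.foldl (fun d key =>
      match hd.get? key with
      | some v => d.insert key v
      | none => d) PySem.Dict.empty
  -- for key, value in headers.items(): if key not in ordered: ordered[key] = value
  let ordered2 : PySem.Dict String String :=
    headers.foldl (fun d kv =>
      if d.contains kv.1 then d else d.insert kv.1 kv.2) ordered
  ordered2.items

-- ===== PORT B =====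
def order_headers_py_alt (headers : List (String × String)) (browser : String) : List (String × String) :=
  let browser_orders := pvBrowserOrders
  let order := browser_orders.getD browser pvChromeOrder
  -- rank = {key: i for i, key in enumerate(order)}
  let rank : PySem.Dict String Int :=
    (PySem.List.enumerate order).foldl (fun d p => d.insert p.2 p.1) PySem.Dict.empty
  -- slots = [None] * len(order); tail = []
  -- for key, value in headers.items(): r = rank.get(key); append to tail if r is None else slots[r] = (key, value)
  let st :=
    headers.foldl (fun (st : List (Option (String × String)) × List (String × String)) kv =>
      match rank.get? kv.1 with
      | some r => (st.1.set r.toNat (some kv), st.2)  -- r is an enumerate index (0 ≤ r < len(slots)), so list assignment is exact here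
      | none => (st.1, st.2 ++ [kv]))
      (List.replicate order.length none, [])
  -- dict([kv for kv in slots if kv is not None] + tail)
  ((st.1.filterMap id ++ st.2).foldl (fun d kv => d.insert kv.1 kv.2) PySem.Dict.empty).items

-- ===== PRECONDITION & SPEC =====
-- headers is a Python dict: an association list with duplicate keys represents no dict value,
-- so Pre_ restricts to the lists that do (it excludes no input the Python A can receive).
def Pre_order_headers_py (headers : List (String × String)) (browser : String) : Prop :=
  (headers.map Prod.fst).Nodup
instance (headers : List (String × String)) (browser : String) : Decidable (Pre_order_headers_py headers browser) := by unfold Pre_order_headers_py; infer_instance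

def pvWitness_order_headers_py : (List (String × String)) × String :=
  ([("accept", "*/*"), ("host", "a.example"), ("x-custom", "1")], "Firefox")

def Spec_order_headers_py (headers : List (String × String)) (browser : String) (out : List (String × String)) : Prop := out = order_headers_py_alt headers browser
instance (headers : List (String × String)) (browser : String) (out : List (String × String)) : Decidable (Spec_order_headers_py headers browser out) := by unfold Spec_order_headers_py; infer_instance

-- ===== CLAIM (what is proved, stated in full; the proofs are below) =====
def Claim_equal_order_headers_py : Prop := ∀ (headers : List (String × String)) (browser : String), Dom_order_headers_py headers browser → Pre_order_headers_py headers browser → Spec_order_headers_py headers browser (order_headers_py headers browser)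

-- ===== LEMMAS AND PROOFS =====

-- abbreviations for the proofs: B's rank table, and the (key, value) pair a dict lookup yields
def pvRank (order : List String) : PySem.Dict String Int :=
  (PySem.List.enumerate order).foldl (fun d p => d.insert p.2 p.1) PySem.Dict.empty

def pvLookup (l : List (String × String)) (k : String) : Option (String × String) :=
  ((PySem.Dict.mk l).get? k).map (fun v => (k, v))

lemma pvRank_def (order : List String) :
    (PySem.List.enumerate order).foldl (fun d p => d.insert p.2 p.1) PySem.Dict.empty
      = pvRank order := rfl

lemma pvOrder_cases (browser : String) :
    pvBrowserOrders.getD browser pvChromeOrder = pvChromeOrder ∨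
    pvBrowserOrders.getD browser pvChromeOrder = pvFirefoxOrder ∨
    pvBrowserOrders.getD browser pvChromeOrder = pvSafariOrder := by
  simp only [pvBrowserOrders, PySem.Dict.getD_eq_get?_getD, PySem.Dict.get?_mk_cons]
  split_ifs <;> simp [PySem.Dict.get?]

lemma pvOrder_nodup (browser : String) :
    (pvBrowserOrders.getD browser pvChromeOrder).Nodup := by
  rcases pvOrder_cases browser with h | h | h <;> rw [h] <;> decide

lemma pvFind_eq_lookup (l : List (String × String)) (k : String) :
    l.find? (fun kv => kv.1 == k) = pvLookup l k := by
  induction l with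
  | nil => simp [pvLookup, PySem.Dict.get?]
  | cons a t ih =>
      rcases a with ⟨x, y⟩
      by_cases h : x = k <;>
        simp [pvLookup, PySem.Dict.get?_mk_cons, h] <;>
        simpa [pvLookup] using ih

lemma pvMapSnd_enumerate (xs : List String) (s : Int) :
    (PySem.List.enumerate xs s).map (fun p => p.2) = xs := by
  induction xs generalizing s with
  | nil => simp [PySem.List.enumerate]
  | cons x t ih => rw [PySem.List.enumerate_cons]; simp [ih]

lemma pvRank_items (order : List String) (h : order.Nodup) :
    (pvRank order).items = (PySem.List.enumerate order).map (fun p => (p.2, p.1)) := by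
  have := PySem.Dict.items_foldl_insert_fresh (PySem.List.enumerate order)
      (fun p => p.2) (fun p => p.1) PySem.Dict.empty
      (fun a _ => PySem.Dict.contains_empty _) (by rw [pvMapSnd_enumerate]; exact h)
  simpa [pvRank] using this

lemma pvRank_keys (order : List String) (h : order.Nodup) :
    (pvRank order).keys = order := by
  show (pvRank order).items.map (·.1) = order
  rw [pvRank_items order h, List.map_map]
  exact pvMapSnd_enumerate order 0

lemma pvRank_none_iff (order : List String) (h : order.Nodup) (k : String) :
    (pvRank order).get? k = none ↔ k ∉ order := by
  rw [PySem.Dict.get?_eq_none_iff_not_mem_keys, pvRank_keys order h]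

lemma pvMem_enumerate {xs : List String} {r : Int} {k : String} :
    (r, k) ∈ PySem.List.enumerate xs 0 → ∃ j : ℕ, ∃ hj : j < xs.length, r = (j : Int) ∧ xs[j] = k := by
  intro hmem
  rcases List.mem_iff_getElem.1 hmem with ⟨j, hj, hEq⟩
  rw [PySem.List.getElem_enumerate] at hEq
  refine ⟨j, by simpa [PySem.List.length_enumerate] using hj, ?_, ?_⟩
  · simpa using congrArg Prod.fst hEq.symm
  · simpa using congrArg Prod.snd hEq

lemma pvRank_some (order : List String) (h : order.Nodup) {k : String} {r : Int}
    (hr : (pvRank order).get? k = some r) :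
    ∃ hj : r.toNat < order.length, (r : Int) = (r.toNat : Int) ∧ order[r.toNat] = k := by
  have hkeys : (pvRank order).keys.Nodup := by
    rw [pvRank_keys order h]; exact h
  have hmem : (k, r) ∈ (pvRank order).items :=
    (PySem.Dict.get?_eq_some_iff_mem_items _ _ _ hkeys).1 hr
  rw [pvRank_items order h] at hmem
  rcases List.mem_map.1 hmem with ⟨p, hp, hpe⟩
  have h1 : p.2 = k := congrArg Prod.fst hpe
  have h2 : p.1 = r := congrArg Prod.snd hpe
  have hp' : (r, k) ∈ PySem.List.enumerate order 0 := by
    rw [← h1, ← h2]; simpa using hp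
  rcases pvMem_enumerate hp' with ⟨j, hj, hrj, hk⟩
  subst hrj
  exact ⟨by simpa using hj, by simp, by simpa using hk⟩

-- A's first pass over `order` appends exactly the present ordered headers
lemma pvPassA1 (hd : PySem.Dict String String) (ord : List String) (acc : PySem.Dict String String)
    (hnd : ord.Nodup) (hfresh : ∀ k ∈ ord, acc.contains k = false) :
    (ord.foldl (fun d key => match hd.get? key with | some v => d.insert key v | none => d) acc).items
      = acc.items ++ ord.filterMap (fun k => (hd.get? k).map (fun v => (k, v))) := by
  induction ord generalizing acc with
  | nil => simp
  | cons k t ih =>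
      have hk : acc.contains k = false := hfresh k (by simp)
      have ht : t.Nodup := hnd.of_cons
      have hkt : k ∉ t := (List.nodup_cons.1 hnd).1
      cases hv : hd.get? k with
      | none => simp only [List.foldl_cons, hv, List.filterMap_cons, Option.map_none]
                exact ih acc ht (fun x hx => hfresh x (by simp [hx]))
      | some v =>
          simp only [List.foldl_cons, hv, List.filterMap_cons, Option.map_some]
          rw [ih (acc.insert k v) ht ?_]
          · rw [PySem.Dict.items_insert_of_not_contains acc v hk]; simp
          · intro x hx
            rw [PySem.Dict.contains_insert]
            have : x ≠ k := fun h => hkt (h ▸ hx)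
            simp [this, hfresh x (by simp [hx])]

-- A's second pass appends the headers whose key the first pass did not place
lemma pvPassA2 (l : List (String × String)) (d : PySem.Dict String String)
    (hnd : (l.map Prod.fst).Nodup) :
    (l.foldl (fun d kv => if d.contains kv.1 then d else d.insert kv.1 kv.2) d).items
      = d.items ++ l.filter (fun kv => !(d.contains kv.1)) := by
  induction l generalizing d with
  | nil => simp
  | cons kv t ih =>
      have ht : (t.map Prod.fst).Nodup := (List.nodup_cons.1 hnd).2
      have hkt : kv.1 ∉ t.map Prod.fst := (List.nodup_cons.1 hnd).1
      by_cases hc : d.contains kv.1 = true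
      · simp only [List.foldl_cons, hc, if_true, List.filter_cons, Bool.not_true]
        simpa using ih d ht
      · have hc' : d.contains kv.1 = false := by simpa using hc
        simp only [List.foldl_cons, List.filter_cons, hc', Bool.not_false, if_true,
          Bool.false_eq_true, if_false]
        rw [ih (d.insert kv.1 kv.2) ht]
        rw [PySem.Dict.items_insert_of_not_contains d kv.2 hc']
        rw [List.filter_congr (q := fun kv' => !(d.contains kv'.1)) ?_]
        · simp
        · intro x hx
          rw [PySem.Dict.contains_insert]
          have : x.1 ≠ kv.1 := fun h => hkt (h ▸ List.mem_map_of_mem hx)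
          simp [this]

-- building a dict from a duplicate-free pair list returns that list
lemma pvBuildDict (L : List (String × String)) (h : (L.map Prod.fst).Nodup) :
    ((L.foldl (fun d kv => d.insert kv.1 kv.2) PySem.Dict.empty).items) = L := by
  have := PySem.Dict.items_foldl_insert_fresh L (fun kv => kv.1) (fun kv => kv.2)
      PySem.Dict.empty (fun a _ => PySem.Dict.contains_empty _) h
  simpa using this

-- B's single pass: slots end up as the per-position first match, the tail as the unranked headers
lemma pvPassB (order : List String) (hord : order.Nodup)
    (l : List (String × String)) (g : String → Option (String × String))
    (t : List (String × String)) (hnd : (l.map Prod.fst).Nodup) :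
    l.foldl (fun (st : List (Option (String × String)) × List (String × String)) kv =>
        match (pvRank order).get? kv.1 with
        | some r => (st.1.set r.toNat (some kv), st.2)
        | none => (st.1, st.2 ++ [kv])) (order.map g, t)
      = (order.map (fun k => (l.find? (fun kv => kv.1 == k)).or (g k)),
         t ++ l.filter (fun kv => ((pvRank order).get? kv.1).isNone)) := by
  induction l generalizing g t with
  | nil => simp
  | cons kv l' ih =>
      have hl' : (l'.map Prod.fst).Nodup := (List.nodup_cons.1 hnd).2
      have hkl' : kv.1 ∉ l'.map Prod.fst := (List.nodup_cons.1 hnd).1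
      cases hr : (pvRank order).get? kv.1 with
      | none =>
          have hmem : kv.1 ∉ order := (pvRank_none_iff order hord kv.1).1 hr
          simp only [List.foldl_cons, hr, List.filter_cons, Option.isNone_none]
          rw [ih g (t ++ [kv]) hl']
          refine Prod.ext ?_ ?_
          · apply List.map_congr_left
            intro k hk
            have hne : (kv.1 == k) = false := by
              simp only [beq_eq_false_iff_ne]; exact fun h => hmem (h ▸ hk)
            rw [List.find?_cons, hne]
          · simp
      | some r =>
          rcases pvRank_some order hord hr with ⟨hj, hcast, hkey⟩
          -- the slot update is a pointwise map update
          have hset : (order.map g).set r.toNat (some kv)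
              = order.map (fun k => if kv.1 == k then some kv else g k) := by
            apply List.ext_getElem
            · simp
            · intro j hj1 hj2
              have hjlen : j < order.length := by simpa using hj2
              rw [List.getElem_set]
              simp only [List.getElem_map]
              by_cases he : r.toNat = j
              · subst he
                simp [hkey]
              · have : (kv.1 == order[j]) = false := by
                  simp only [beq_eq_false_iff_ne]
                  intro hEq
                  exact he (hord.getElem_inj_iff.1 (by rw [hkey, hEq]))
                rw [this]
                simp [he]
          simp only [List.foldl_cons, hr, List.filter_cons, Option.isNone_some]
          rw [hset, ih (fun k => if kv.1 == k then some kv else g k) t hl']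
          refine Prod.ext ?_ ?_
          · apply List.map_congr_left
            intro k hk
            by_cases he : kv.1 = k
            · subst he
              have : l'.find? (fun kv' => kv'.1 == kv.1) = none := by
                rw [List.find?_eq_none]
                intro x hx
                simp only [Bool.not_eq_true, beq_eq_false_iff_ne]
                exact fun h => hkl' (h ▸ List.mem_map_of_mem hx)
              rw [List.find?_cons, this]
              simp
            · have hne : (kv.1 == k) = false := by simpa using he
              rw [List.find?_cons, hne]
              simp
          · simp

lemma pvMapFst_filterMap_lookup (headers : List (String × String)) (order : List String) :
    (order.filterMap (pvLookup headers)).map Prod.fst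
      = order.filter (fun k => ((PySem.Dict.mk headers).get? k).isSome) := by
  induction order with
  | nil => simp
  | cons k t ih =>
      rw [List.filterMap_cons, List.filter_cons]
      cases hv : (PySem.Dict.mk headers).get? k with
      | none =>
          have h1 : pvLookup headers k = none := by simp [pvLookup, hv]
          simp [h1, ih]
      | some v =>
          have h1 : pvLookup headers k = some (k, v) := by simp [pvLookup, hv]
          simp [h1, ih]

lemma pvGet?_of_mem (headers : List (String × String)) (hnd : (headers.map Prod.fst).Nodup)
    {kv : String × String} (h : kv ∈ headers) :
    (PySem.Dict.mk headers).get? kv.1 = some kv.2 :=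
  PySem.Dict.get?_of_mem_items (d := PySem.Dict.mk headers) (by exact h) (by simpa using hnd)

-- ===== VERDICT (by name: the statement is the Claim_ definition above) =====
theorem order_headers_py_spec : Claim_equal_order_headers_py := by
  intro headers browser _ hpre
  unfold Spec_order_headers_py
  unfold Pre_order_headers_py at hpre
  simp only [order_headers_py, order_headers_py_alt]
  set ord := pvBrowserOrders.getD browser pvChromeOrder with hordDef
  have hord : ord.Nodup := pvOrder_nodup browser
  rw [pvRank_def]
  -- A side
  rw [pvPassA2 _ _ hpre, pvPassA1 (PySem.Dict.mk headers) ord PySem.Dict.empty hord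
    (fun k _ => PySem.Dict.contains_empty _)]
  -- B side
  rw [show (List.replicate ord.length (none : Option (String × String)))
        = ord.map (fun _ => none) from Eq.symm List.map_const']
  rw [pvPassB ord hord headers _ [] hpre]
  simp only [Option.or_none, pvFind_eq_lookup, List.nil_append]
  -- both sides are P ++ Q for P = the ordered present headers, Q = the unranked headers
  have hA1 : (ord.foldl (fun d key =>
      match (PySem.Dict.mk headers).get? key with
      | some v => d.insert key v
      | none => d) PySem.Dict.empty).items = ord.filterMap (pvLookup headers) := by
    rw [pvPassA1 (PySem.Dict.mk headers) ord PySem.Dict.empty hord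
      (fun k _ => PySem.Dict.contains_empty _)]
    rw [show (PySem.Dict.empty : PySem.Dict String String).items = [] from rfl,
      List.nil_append]
    rfl
  have hkeys : (ord.foldl (fun d key =>
      match (PySem.Dict.mk headers).get? key with
      | some v => d.insert key v
      | none => d) PySem.Dict.empty).keys
      = ord.filter (fun k => ((PySem.Dict.mk headers).get? k).isSome) := by
    simp only [PySem.Dict.keys]
    rw [hA1]
    simpa using pvMapFst_filterMap_lookup headers ord
  have hcong : ∀ kv ∈ headers,
      (!(ord.foldl (fun d key =>
        match (PySem.Dict.mk headers).get? key with
        | some v => d.insert key v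
        | none => d) PySem.Dict.empty).contains kv.1)
      = ((pvRank ord).get? kv.1).isNone := by
    intro kv hkv
    rw [PySem.Dict.contains_eq_decide_mem_keys, hkeys]
    have hget := pvGet?_of_mem headers hpre hkv
    by_cases hmem : kv.1 ∈ ord
    · have h0 : (pvRank ord).get? kv.1 ≠ none :=
        fun h => ((pvRank_none_iff ord hord kv.1).1 h) hmem
      have h2 : kv.1 ∈ ord.filter (fun k => ((PySem.Dict.mk headers).get? k).isSome) :=
        List.mem_filter.2 ⟨hmem, by simp [hget]⟩
      cases hx : (pvRank ord).get? kv.1 with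
      | none => exact absurd hx h0
      | some r => simp [h2]
    · have h0 : (pvRank ord).get? kv.1 = none := (pvRank_none_iff ord hord kv.1).2 hmem
      have h2 : kv.1 ∉ ord.filter (fun k => ((PySem.Dict.mk headers).get? k).isSome) :=
        fun hx => hmem (List.mem_filter.1 hx).1
      simp [h2, h0]
  -- duplicate-free keys of P ++ Q, so the final dict build returns the list itself
  have hPfst : (ord.filterMap (pvLookup headers)).map Prod.fst
      = ord.filter (fun k => ((PySem.Dict.mk headers).get? k).isSome) :=
    pvMapFst_filterMap_lookup headers ord
  have hPnd : ((ord.filterMap (pvLookup headers)).map Prod.fst).Nodup := by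
    rw [hPfst]; exact List.Sublist.nodup List.filter_sublist hord
  have hQnd : ((headers.filter (fun kv => ((pvRank ord).get? kv.1).isNone)).map Prod.fst).Nodup :=
    (List.Sublist.map Prod.fst List.filter_sublist).nodup hpre
  have hdisj : List.Disjoint
      ((ord.filterMap (pvLookup headers)).map Prod.fst)
      ((headers.filter (fun kv => ((pvRank ord).get? kv.1).isNone)).map Prod.fst) := by
    intro a ha hb
    rw [hPfst] at ha
    have hao : a ∈ ord := (List.mem_filter.1 ha).1
    rcases List.mem_map.1 hb with ⟨kv, hkv, rfl⟩
    have : ((pvRank ord).get? kv.1).isNone = true := (List.mem_filter.1 hkv).2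
    exact (pvRank_none_iff ord hord kv.1).1 (Option.isNone_iff_eq_none.1 this) hao
  rw [List.filterMap_map]
  rw [pvBuildDict _ (by
    rw [List.map_append]
    refine List.Nodup.append ?_ hQnd hdisj
    simpa [Function.comp_def, pvLookup] using hPnd)]
  rw [List.filter_congr hcong]
  simp [pvLookup, show (PySem.Dict.empty : PySem.Dict String String).items = [] from rfl]
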